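-- pv_equiv track=rewrite | github.com/Mriris/ntire | resize.py | get_target_height
-- ===== SOURCE A (Python) =====
-- import math
--
-- def get_target_height(original_height):
--     """
--     计算向上取整到16的倍数且能被3整除的目标高度
--     :param original_height: 原始高度
--     :return: 计算后的目标高度
--     """
--     # 先向上取整到16的倍数
--
--     number = math.ceil(original_height / 16)
--     height = number * 16
--
--     if original_height > 480:
--         return math.floor(original_height / 480) * 480
--     while height < 480: # 假设最大宽度是480
--         # 确保能被3整除
--         if height % 3 != 0:
--             number += 1
--             height = number * 16
--         else:
--             return height
--     if height == 480:
--         return height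
-- ===== SOURCE B (Python) =====
-- import math
--
-- def get_target_height(original_height):
--     # Closed form: A's while-loop searches for the smallest multiple of 16 that is
--     # also divisible by 3, i.e. 48 * ceil(number / 3). No loop needed.
--     number = math.ceil(original_height / 16)
--     if original_height > 480:
--         return math.floor(original_height / 480) * 480
--     return 48 * math.ceil(number / 3)
-- ===== Notes on version B (the rewrite author's own statement) =====
-- stated objective: simpler
-- what changed: Replaced A's bounded while-loop that searches for the smallest multiple of 16 divisible by 3 with the closed-form expression 48 * ceil(number / 3); no loop remains.
import Mathlib
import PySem

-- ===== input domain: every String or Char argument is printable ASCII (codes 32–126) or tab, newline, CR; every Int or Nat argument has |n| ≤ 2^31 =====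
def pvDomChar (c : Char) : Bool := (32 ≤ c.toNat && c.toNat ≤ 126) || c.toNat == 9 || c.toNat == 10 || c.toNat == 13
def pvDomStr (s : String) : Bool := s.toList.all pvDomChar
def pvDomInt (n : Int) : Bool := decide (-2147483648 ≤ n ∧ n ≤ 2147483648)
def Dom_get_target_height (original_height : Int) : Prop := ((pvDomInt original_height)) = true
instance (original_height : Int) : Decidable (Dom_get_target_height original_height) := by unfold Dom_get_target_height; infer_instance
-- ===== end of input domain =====

-- ===== PORT A =====
-- While-loop of A: at most 2 increments occur before number % 3 == 0, so fuel 4 is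
-- always sufficient; the final fall-through (Python returns None) is unreachable for
-- integer inputs since height never exceeds 480 in this branch.
def pvLoopA : Nat → Int → Int → Int
  | 0, _, height => height
  | fuel+1, number, height =>
    if height < 480 then
      if PySem.Int.mod height 3 ≠ 0 then
        pvLoopA fuel (number + 1) ((number + 1) * 16)
      else height
    else if height = 480 then height else 0

def get_target_height (original_height : Int) : Int :=
  let number := -(PySem.Int.floordiv (-original_height) 16)  -- math.ceil(h/16), exact for ints
  let height := number * 16
  if original_height > 480 then PySem.Int.floordiv original_height 480 * 480
  else pvLoopA 4 number height

-- ===== PORT B =====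
def get_target_height_alt (original_height : Int) : Int :=
  let number := -(PySem.Int.floordiv (-original_height) 16)  -- math.ceil(h/16), exact for ints
  if original_height > 480 then PySem.Int.floordiv original_height 480 * 480
  else 48 * (-(PySem.Int.floordiv (-number) 3))

-- ===== PRECONDITION & SPEC =====
def Spec_get_target_height (original_height : Int) (out : Int) : Prop := out = get_target_height_alt original_height
instance (original_height : Int) (out : Int) : Decidable (Spec_get_target_height original_height out) := by unfold Spec_get_target_height; infer_instance

-- ===== CLAIM (what is proved, stated in full; the proofs are below) =====
def Claim_equal_get_target_height : Prop := ∀ (original_height : Int), Dom_get_target_height original_height → Spec_get_target_height original_height (get_target_height original_height)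

-- ===== LEMMAS AND PROOFS =====

-- One honest line: B replaces A's divisible-by-3 search loop with the closed form
-- 48 * ceil(number / 3) (objective: simpler).
-- ===== VERDICT (by name: the statement is the Claim_ definition above) =====
theorem get_target_height_spec : Claim_equal_get_target_height := by
  intro h _
  unfold Spec_get_target_height get_target_height get_target_height_alt
  by_cases hgt : h > 480
  · simp [hgt]
  · simp only [hgt, if_false]
    set n : Int := -(PySem.Int.floordiv (-h) 16) with hn
    have hb : (n - 1) * 16 < h ∧ h ≤ n * 16 :=
      (PySem.Int.neg_floordiv_neg_eq_iff_of_pos (by omega)).mp hn.symm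
    have hc' : ∀ c : Int, -(PySem.Int.floordiv (-n) 3) = c → (c - 1) * 3 < n ∧ n ≤ c * 3 :=
      fun c hcc => (PySem.Int.neg_floordiv_neg_eq_iff_of_pos (by omega)).mp hcc
    have hcb := hc' _ rfl
    set c : Int := -(PySem.Int.floordiv (-n) 3) with hcdef
    have hn30 : n ≤ 30 := by omega
    have hm : ∀ x : Int, PySem.Int.mod x 3 = x % 3 :=
      fun x => PySem.Int.mod_eq_emod_of_pos (by omega)
    show pvLoopA 4 n (n * 16) = 48 * c
    have e0 : (n * 16) % 3 = n % 3 := by omega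
    have e1 : ((n + 1) * 16) % 3 = (n + 1) % 3 := by omega
    have e2 : ((n + 1 + 1) * 16) % 3 = (n + 1 + 1) % 3 := by omega
    have e3 : ((n + 1 + 1 + 1) * 16) % 3 = (n + 1 + 1 + 1) % 3 := by omega
    simp only [pvLoopA, hm, e0, e1, e2, e3]
    split_ifs <;> omega
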